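-- pv_equiv track=rewrite | github.com/pypi-data/pypi-mirror-4 | packages/sterch.scrapingtools/sterch.scrapingtools-0.2.5.tar.gz/sterch.scrapingtools-0.2.5/src/sterch/scrapingtools/text.py | parse_city_state_zip
-- ===== SOURCE A (Python) =====
-- def parse_city_state_zip(city_state_zip):
--     """ Parses city_state_zip into a dict """
--     info = dict(city="", state="", zip="")
--     try:
--         info["city"], info["state"], info["zip"] = city_state_zip.rsplit(" ", 2)
--     except:
--         try:
--             p1, p2 = city_state_zip.rsplit(" ", 1)
--             # check if p1 is US zip :
--             if all(map(lambda x:x in "0123456789-", p2)):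
--                 info['state'], info['zip'] = p1, p2
--             else:
--                 info['city'], info['state'] = p1, p2
--         except:
--             info['city'] = city_state_zip
--     for f in ('city', 'state', 'zip'):
--         info[f] = info[f].replace(u'\xa0','')
--     info['state'] = info['state'].upper()
--     return info
-- ===== SOURCE B (Python) =====
-- def parse_city_state_zip(city_state_zip):
--     """ Parses city_state_zip into a dict (single right-to-left scan, no rsplit) """
--     f = [[], [], []]          # city, state, zip accumulators (chars in reverse order)
--     k = 2                     # state machine: 2 = filling zip, 1 = state, 0 = city
--     for ch in reversed(city_state_zip):
--         if ch == ' ' and k > 0: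
--             k -= 1
--         else:
--             f[k].append(ch)
--     if k == 0:
--         city, state, zip_ = f
--     elif k == 1:
--         if all(c in "0123456789-" for c in f[2]):
--             city, state, zip_ = [], f[1], f[2]
--         else:
--             city, state, zip_ = f[1], f[2], []
--     else:
--         city, state, zip_ = f[2], [], []
--     clean = lambda t: ''.join(reversed(t)).replace('\xa0', '')
--     return {"city": clean(city), "state": clean(state).upper(), "zip": clean(zip_)}
-- ===== Notes on version B (the rewrite author's own statement) =====
-- stated objective: alternative
-- what changed: B replaces A's try/except double-rsplit and dict mutation by a single right-to-left character scan with a 3-state machine (zip->state->city) that accumulates the fields in one pass, then dispatches on how many spaces the scan consumed.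
import Mathlib
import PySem

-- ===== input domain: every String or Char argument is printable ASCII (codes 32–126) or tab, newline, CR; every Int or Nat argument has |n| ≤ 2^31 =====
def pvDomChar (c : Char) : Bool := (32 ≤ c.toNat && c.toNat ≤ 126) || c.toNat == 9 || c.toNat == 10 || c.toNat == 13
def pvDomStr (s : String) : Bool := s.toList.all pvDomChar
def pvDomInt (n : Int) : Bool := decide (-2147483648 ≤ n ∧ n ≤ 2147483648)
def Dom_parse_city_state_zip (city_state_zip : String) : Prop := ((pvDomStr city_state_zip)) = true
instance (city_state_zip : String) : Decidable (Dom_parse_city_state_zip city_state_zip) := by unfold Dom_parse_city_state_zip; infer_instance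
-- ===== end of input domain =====

-- B replaces A's try/except double-rsplit and dict mutation by ONE right-to-left character
-- scan with a 3-state machine accumulating zip/state/city (objective: alternative).

-- hand port of str.rsplit(" ", 1) (PySem has no rsplit): split at the LAST space, if any
def pyRsplit1 (s : List Char) : List (List Char) :=
  match s.reverse.dropWhile (· ≠ ' ') with
  | [] => [s]
  | _ :: pre => [pre.reverse, (s.reverse.takeWhile (· ≠ ' ')).reverse]

-- hand port of str.rsplit(" ", 2): split once from the right, then split the head once more
def pyRsplit2 (s : List Char) : List (List Char) :=
  match pyRsplit1 s with
  | [p, q] => pyRsplit1 p ++ [q]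
  | ps => ps

-- ===== PORT A =====
def parse_city_state_zip (city_state_zip : String) : List (String × String) :=
  let info0 : PySem.Dict String String :=
    ((PySem.Dict.empty.insert "city" "").insert "state" "").insert "zip" ""
  let info1 :=
    match pyRsplit2 city_state_zip.toList with
    | [c, st, z] =>
        ((info0.insert "city" (String.ofList c)).insert "state" (String.ofList st)).insert
          "zip" (String.ofList z)
    | _ =>
      match pyRsplit1 city_state_zip.toList with
      | [p1, p2] =>
          -- all(map(lambda x: x in "0123456789-", p2)): char-in-string is char membership
          if p2.all (fun x => x ∈ "0123456789-".toList) then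
            (info0.insert "state" (String.ofList p1)).insert "zip" (String.ofList p2)
          else
            (info0.insert "city" (String.ofList p1)).insert "state" (String.ofList p2)
      | _ => info0.insert "city" city_state_zip
  let info2 := ["city", "state", "zip"].foldl
      (fun d f => d.insert f (PySem.Str.replace (d.getD f "") "\u00A0" "")) info1
  let info3 := info2.insert "state" (PySem.Str.upper (info2.getD "state" ""))
  info3.items

-- ===== PORT B =====
-- strings are carried as List Char (PySem.Chars convention); f[k].append(ch) is ++ [ch]
def bStep (st : Nat × List Char × List Char × List Char) (ch : Char) :
    Nat × List Char × List Char × List Char :=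
  let (k, f0, f1, f2) := st
  if ch = ' ' ∧ 0 < k then (k - 1, f0, f1, f2)
  else match k with
    | 0 => (0, f0 ++ [ch], f1, f2)
    | 1 => (1, f0, f1 ++ [ch], f2)
    | _ => (k, f0, f1, f2 ++ [ch])

-- ''.join(reversed(t)).replace('\xa0','')
def bClean (cs : List Char) : String := PySem.Str.replace (String.ofList cs.reverse) "\u00A0" ""

def parse_city_state_zip_alt (city_state_zip : String) : List (String × String) :=
  let st := city_state_zip.toList.reverse.foldl bStep (2, [], [], [])
  let k := st.1
  let f0 := st.2.1
  let f1 := st.2.2.1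
  let f2 := st.2.2.2
  let csz : List Char × List Char × List Char :=
    if k = 0 then (f0, f1, f2)
    else if k = 1 then
      if f2.all (fun c => c ∈ "0123456789-".toList) then ([], f1, f2) else (f1, f2, [])
    else (f2, [], [])
  [("city", bClean csz.1), ("state", PySem.Str.upper (bClean csz.2.1)), ("zip", bClean csz.2.2)]

-- ===== PRECONDITION & SPEC =====
def Spec_parse_city_state_zip (city_state_zip : String) (out : List (String × String)) : Prop := out = parse_city_state_zip_alt city_state_zip
instance (city_state_zip : String) (out : List (String × String)) : Decidable (Spec_parse_city_state_zip city_state_zip out) := by unfold Spec_parse_city_state_zip; infer_instance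

-- ===== CLAIM (what is proved, stated in full; the proofs are below) =====
def Claim_equal_parse_city_state_zip : Prop := ∀ (city_state_zip : String), Dom_parse_city_state_zip city_state_zip → Spec_parse_city_state_zip city_state_zip (parse_city_state_zip city_state_zip)

-- ===== LEMMAS AND PROOFS =====

-- phase 0: all remaining characters go to the city accumulator
theorem foldl_bStep_zero (r : List Char) (f0 f1 f2 : List Char) :
    r.foldl bStep (0, f0, f1, f2) = (0, f0 ++ r, f1, f2) := by
  induction r generalizing f0 with
  | nil => simp
  | cons c r ih => simp [bStep, ih]

-- phase 1: scan to the next space (filling state), then phase 0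
theorem foldl_bStep_one (r : List Char) (f0 f1 f2 : List Char) :
    r.foldl bStep (1, f0, f1, f2) =
      (match r.dropWhile (· ≠ ' ') with
       | [] => (1, f0, f1 ++ r.takeWhile (· ≠ ' '), f2)
       | _ :: rest => (0, f0 ++ rest, f1 ++ r.takeWhile (· ≠ ' '), f2)) := by
  induction r generalizing f1 with
  | nil => simp
  | cons c r ih =>
    by_cases hc : c = ' '
    · simp [hc, bStep, foldl_bStep_zero]
    · simp [hc, bStep, ih]

-- phase 2: scan to the next space (filling zip), then phase 1
theorem foldl_bStep_two (r : List Char) (f0 f1 f2 : List Char) :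
    r.foldl bStep (2, f0, f1, f2) =
      (match r.dropWhile (· ≠ ' ') with
       | [] => (2, f0, f1, f2 ++ r.takeWhile (· ≠ ' '))
       | _ :: rest => rest.foldl bStep (1, f0, f1, f2 ++ r.takeWhile (· ≠ ' '))) := by
  induction r generalizing f2 with
  | nil => simp
  | cons c r ih =>
    by_cases hc : c = ' '
    · simp [hc, bStep]
    · simp [hc, bStep, ih]


theorem foldl_bStep_two_nil (r : List Char) (f0 f1 f2 : List Char)
    (h : r.dropWhile (· ≠ ' ') = []) :
    r.foldl bStep (2, f0, f1, f2) = (2, f0, f1, f2 ++ r.takeWhile (· ≠ ' ')) := by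
  rw [foldl_bStep_two, h]

theorem foldl_bStep_two_cons (r : List Char) (c : Char) (rest : List Char) (f0 f1 f2 : List Char)
    (h : r.dropWhile (· ≠ ' ') = c :: rest) :
    r.foldl bStep (2, f0, f1, f2) =
      rest.foldl bStep (1, f0, f1, f2 ++ r.takeWhile (· ≠ ' ')) := by
  rw [foldl_bStep_two, h]

theorem foldl_bStep_one_nil (r : List Char) (f0 f1 f2 : List Char)
    (h : r.dropWhile (· ≠ ' ') = []) :
    r.foldl bStep (1, f0, f1, f2) = (1, f0, f1 ++ r.takeWhile (· ≠ ' '), f2) := by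
  rw [foldl_bStep_one, h]

theorem foldl_bStep_one_cons (r : List Char) (c : Char) (rest : List Char) (f0 f1 f2 : List Char)
    (h : r.dropWhile (· ≠ ' ') = c :: rest) :
    r.foldl bStep (1, f0, f1, f2) =
      (0, f0 ++ rest, f1 ++ r.takeWhile (· ≠ ' '), f2) := by
  rw [foldl_bStep_one, h]

-- when dropWhile finds nothing, takeWhile is the whole list
theorem takeWhile_eq_self_of_dropWhile_nil (r : List Char)
    (h : r.dropWhile (· ≠ ' ') = []) : r.takeWhile (· ≠ ' ') = r := by
  have := List.takeWhile_append_dropWhile (p := (· ≠ ' ')) (l := r)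
  rw [h] at this; simpa using this

-- ===== VERDICT (by name: the statement is the Claim_ definition above) =====
theorem parse_city_state_zip_spec : Claim_equal_parse_city_state_zip := by
  intro s _
  unfold Spec_parse_city_state_zip parse_city_state_zip parse_city_state_zip_alt
  cases h1 : (s.toList.reverse).dropWhile (· ≠ ' ') with
  | nil =>
    -- no space: one part
    rw [foldl_bStep_two_nil _ _ _ _ h1, takeWhile_eq_self_of_dropWhile_nil _ h1]
    have hs : String.ofList s.toList = s := by simp [String.ofList]
    simp only [pyRsplit2, pyRsplit1, h1]
    simp [bClean, hs, PySem.Dict.insert, PySem.Dict.empty, PySem.Dict.getD, PySem.Dict.get?,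
      List.foldl]
  | cons c1 r1 =>
    rw [foldl_bStep_two_cons _ _ _ _ _ _ h1]
    cases h2 : r1.dropWhile (· ≠ ' ') with
    | nil =>
      -- exactly one split: two parts
      rw [foldl_bStep_one_nil _ _ _ _ h2, takeWhile_eq_self_of_dropWhile_nil _ h2]
      simp only [pyRsplit2, pyRsplit1, h1, List.reverse_reverse, h2, List.nil_append, List.all_reverse]
      rcases Bool.eq_false_or_eq_true
          (((s.toList.reverse).takeWhile (· ≠ ' ')).all
            fun x => decide (x ∈ "0123456789-".toList)) with hq | hq <;>
        simp only [hq] <;>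
        simp [bClean, PySem.Dict.insert, PySem.Dict.empty, PySem.Dict.getD, PySem.Dict.get?,
          List.foldl]
    | cons c2 r2 =>
      -- two splits: three parts
      rw [foldl_bStep_one_cons _ _ _ _ _ _ h2]
      simp only [pyRsplit2, pyRsplit1, h1, List.reverse_reverse, h2]
      simp [bClean, PySem.Dict.insert, PySem.Dict.empty, PySem.Dict.getD, PySem.Dict.get?,
        List.foldl]
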